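-- pv_equiv track=rewrite | github.com/Pop101/Discord-Code-Executor | boilerplates.py | for_lolcode
-- ===== SOURCE A (Python) =====
-- def for_lolcode(source):
--     if 'HAI ' in source:
--         return source
--
--     code = ['HAI 1.2']
--
--     lines = source.split('\n')
--     for line in lines:
--             code.append('\t'+line)
--
--     code.append('KTHXBYE')
--     return '\n'.join(code)
-- ===== SOURCE B (Python) =====
-- def for_lolcode(source):
--     if 'HAI ' in source:
--         return source
--     return 'HAI 1.2\n\t' + source.replace('\n', '\n\t') + '\nKTHXBYE'
-- ===== Notes on version B (the rewrite author's own statement) =====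
-- stated objective: simpler
-- what changed: Replaces the list accumulator, per-line loop and join with a single whole-string replace of newline by newline-plus-tab, spliced between the literal header and footer.
import Mathlib
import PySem

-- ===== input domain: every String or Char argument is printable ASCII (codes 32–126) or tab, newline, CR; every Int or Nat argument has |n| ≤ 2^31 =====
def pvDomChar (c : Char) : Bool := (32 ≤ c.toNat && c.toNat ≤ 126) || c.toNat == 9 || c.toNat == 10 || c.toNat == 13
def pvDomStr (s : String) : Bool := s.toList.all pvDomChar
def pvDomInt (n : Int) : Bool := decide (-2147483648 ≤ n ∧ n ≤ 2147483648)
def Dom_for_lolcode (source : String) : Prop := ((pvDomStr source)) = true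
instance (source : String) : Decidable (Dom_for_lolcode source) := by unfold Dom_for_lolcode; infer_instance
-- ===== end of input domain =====

-- B replaces A's list accumulator, per-line loop and join by one whole-string replace between two literals (objective: simpler).

-- ===== PORT A =====
def for_lolcode (source : String) : String :=
  if PySem.Str.isIn "HAI " source then source
  else
    let code : List String := ["HAI 1.2"]
    let lines : List String := (PySem.Str.split? source "\n").getD []   -- sep is non-empty, so split? is always `some`
    let code := lines.foldl (fun acc line => acc ++ ["\t" ++ line]) code
    let code := code ++ ["KTHXBYE"]
    PySem.Str.join "\n" code

-- ===== PORT B =====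
def for_lolcode_alt (source : String) : String :=
  if PySem.Str.isIn "HAI " source then source
  else "HAI 1.2\n\t" ++ PySem.Str.replace source "\n" "\n\t" ++ "\nKTHXBYE"

-- ===== PRECONDITION & SPEC =====
def Spec_for_lolcode (source : String) (out : String) : Prop := out = for_lolcode_alt source
instance (source : String) (out : String) : Decidable (Spec_for_lolcode source out) := by unfold Spec_for_lolcode; infer_instance

-- ===== CLAIM (what is proved, stated in full; the proofs are below) =====
def Claim_equal_for_lolcode : Prop := ∀ (source : String), Dom_for_lolcode source → Spec_for_lolcode source (for_lolcode source)

-- ===== LEMMAS AND PROOFS =====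

-- structural reference for splitting on '\n'
def pvSpl : List Char → List (List Char)
  | [] => [[]]
  | c :: t => if c = '\n' then [] :: pvSpl t
              else match pvSpl t with
                   | [] => [[c]]
                   | p :: ps => (c :: p) :: ps

-- structural reference for replace '\n' → '\n\t'
def pvRep : List Char → List Char
  | [] => []
  | c :: t => if c = '\n' then '\n' :: '\t' :: pvRep t else c :: pvRep t

theorem pvSpl_ne_nil (l : List Char) : pvSpl l ≠ [] := by
  cases l with
  | nil => simp [pvSpl]
  | cons c t =>
    simp only [pvSpl]
    split_ifs
    · simp
    · cases h : pvSpl t <;> simp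

theorem splitOn_go_eq (fuel : Nat) (l cur : List Char) (acc : List (List Char))
    (h : l.length ≤ fuel) :
    PySem.Chars.splitOn.go ['\n'] fuel l cur acc =
      acc.reverse ++ (match pvSpl l with
                      | [] => [cur.reverse]
                      | p :: ps => (cur.reverse ++ p) :: ps) := by
  induction fuel generalizing l cur acc with
  | zero =>
    have : l = [] := List.length_eq_zero_iff.mp (Nat.le_zero.mp h)
    subst this
    simp [PySem.Chars.splitOn.go, pvSpl]
  | succ n ih =>
    cases l with
    | nil => simp [PySem.Chars.splitOn.go, pvSpl]
    | cons c t =>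
      simp only [PySem.Chars.splitOn.go]
      by_cases hc : c = '\n'
      · subst hc
        rw [if_pos (by simp [List.isPrefixOf])]
        simp only [List.length_singleton, List.drop_succ_cons, List.drop_zero]
        rw [ih t [] _ (by simpa using Nat.le_of_succ_le_succ h)]
        simp only [pvSpl]
        cases hs : pvSpl t with
        | nil => exact absurd hs (pvSpl_ne_nil t)
        | cons p ps => simp
      · rw [if_neg (by simp [List.isPrefixOf]; exact fun he => absurd he.symm hc)]
        rw [ih t (c :: cur) acc (by simpa using Nat.le_of_succ_le_succ h)]
        simp only [pvSpl, if_neg hc]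
        cases hs : pvSpl t with
        | nil => simp
        | cons p ps => simp

theorem splitOn_eq (l : List Char) : PySem.Chars.splitOn l ['\n'] = pvSpl l := by
  unfold PySem.Chars.splitOn
  rw [splitOn_go_eq l.length.succ l [] [] (Nat.le_succ _)]
  cases hs : pvSpl l with
  | nil => exact absurd hs (pvSpl_ne_nil l)
  | cons p ps => simp

theorem replace_go_eq (fuel : Nat) (l acc : List Char) (h : l.length ≤ fuel) :
    PySem.Chars.replace.go ['\n'] ['\n', '\t'] fuel l acc = acc.reverse ++ pvRep l := by
  induction fuel generalizing l acc with
  | zero =>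
    have : l = [] := List.length_eq_zero_iff.mp (Nat.le_zero.mp h)
    subst this
    simp [PySem.Chars.replace.go, pvRep]
  | succ n ih =>
    cases l with
    | nil => simp [PySem.Chars.replace.go, pvRep]
    | cons c t =>
      simp only [PySem.Chars.replace.go]
      by_cases hc : c = '\n'
      · subst hc
        rw [if_pos (by simp [List.isPrefixOf])]
        simp only [List.length_singleton, List.drop_succ_cons, List.drop_zero]
        rw [ih t _ (by simpa using Nat.le_of_succ_le_succ h)]
        simp [pvRep]
      · rw [if_neg (by simp [List.isPrefixOf]; exact fun he => absurd he.symm hc)]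
        rw [ih t (c :: acc) (by simpa using Nat.le_of_succ_le_succ h)]
        simp [pvRep, hc]

theorem replace_eq (l : List Char) :
    PySem.Chars.replace l ['\n'] ['\n', '\t'] = pvRep l := by
  unfold PySem.Chars.replace
  rw [if_neg (by simp)]
  exact replace_go_eq l.length l [] le_rfl

-- the heart: joining the tab-prefixed split pieces = tab :: replaced string
theorem join_spl_eq_rep (l : List Char) :
    PySem.Chars.join ['\n'] ((pvSpl l).map (fun p => '\t' :: p)) = '\t' :: pvRep l := by
  induction l with
  | nil => simp [pvSpl, pvRep, PySem.Chars.join, List.intercalate]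
  | cons c t ih =>
    by_cases hc : c = '\n'
    · subst hc
      rw [show (pvSpl ('\n' :: t)).map (fun p => '\t' :: p)
            = ['\t'] :: (pvSpl t).map (fun p => '\t' :: p) by simp [pvSpl],
          show pvRep ('\n' :: t) = '\n' :: '\t' :: pvRep t by simp [pvRep]]
      rw [show PySem.Chars.join ['\n'] (['\t'] :: ((pvSpl t).map (fun p => '\t' :: p)))
            = '\t' :: '\n' :: PySem.Chars.join ['\n'] ((pvSpl t).map (fun p => '\t' :: p)) by
        simp [PySem.Chars.join]
        cases hs : (pvSpl t).map (fun p => '\t' :: p) with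
        | nil => exact absurd (List.map_eq_nil_iff.mp hs) (pvSpl_ne_nil t)
        | cons p ps => simp [List.intercalate, List.intersperse]]
      rw [ih]
    · simp only [pvSpl, if_neg hc, pvRep]
      cases hs : pvSpl t with
      | nil => exact absurd hs (pvSpl_ne_nil t)
      | cons p ps =>
        rw [hs] at ih
        simp only [List.map_cons] at ih ⊢
        rw [show PySem.Chars.join ['\n'] (('\t' :: c :: p) :: ps.map (fun q => '\t' :: q))
              = '\t' :: c :: (PySem.Chars.join ['\n'] (('\t' :: p) :: ps.map (fun q => '\t' :: q))).tail by
          simp [PySem.Chars.join, List.intercalate]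
          cases ps <;> simp]
        rw [ih]
        simp

theorem foldl_append_map {α β : Type} (f : α → β) (l : List α) (init : List β) :
    l.foldl (fun acc x => acc ++ [f x]) init = init ++ l.map f := by
  induction l generalizing init with
  | nil => simp
  | cons x t ih => simp [List.foldl_cons, ih]

theorem join_cons {a p : List Char} (ps : List (List Char)) :
    PySem.Chars.join ['\n'] (a :: p :: ps) = a ++ '\n' :: PySem.Chars.join ['\n'] (p :: ps) := by
  simp [PySem.Chars.join, List.intercalate]

theorem join_concat (ps : List (List Char)) (b p : List Char) :
    PySem.Chars.join ['\n'] (p :: (ps ++ [b]))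
      = PySem.Chars.join ['\n'] (p :: ps) ++ '\n' :: b := by
  induction ps generalizing p with
  | nil => simp [PySem.Chars.join, List.intercalate]
  | cons q qs ih =>
    simp only [List.cons_append]
    rw [join_cons, ih, join_cons]
    simp

-- ===== VERDICT (by name: the statement is the Claim_ definition above) =====
theorem for_lolcode_spec : Claim_equal_for_lolcode := by
  intro source _
  unfold Spec_for_lolcode for_lolcode for_lolcode_alt
  by_cases h : PySem.Str.isIn "HAI " source = true
  · rw [if_pos h, if_pos h]
  · rw [if_neg h, if_neg h]
    apply String.toList_inj.mp
    dsimp only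
    rw [foldl_append_map]
    have hsplit : PySem.Str.split? source "\n"
        = some ((pvSpl source.toList).map String.ofList) := by
      simp [PySem.Str.split?, PySem.Chars.split?, splitOn_eq]
    rw [hsplit]
    simp only [Option.getD_some, PySem.Str.toList_join, List.map_append, List.map_map,
      List.map_cons, List.singleton_append, String.toList_append]
    rw [show List.map (String.toList ∘ HAppend.hAppend "\t" ∘ String.ofList) (pvSpl source.toList)
          = (pvSpl source.toList).map (fun p => '\t' :: p) from
        List.map_congr_left (fun p _ => by simp)]
    cases hs : (pvSpl source.toList).map (fun p => '\t' :: p) with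
    | nil => exact absurd (List.map_eq_nil_iff.mp hs) (pvSpl_ne_nil _)
    | cons p ps =>
      rw [show List.map String.toList ([] : List String) = [] from rfl,
          show "\n".toList = ['\n'] from rfl,
          show ("HAI 1.2".toList :: (p :: ps) ++ ["KTHXBYE".toList])
             = "HAI 1.2".toList :: p :: (ps ++ ["KTHXBYE".toList]) from by simp,
          join_cons, join_concat, ← hs, join_spl_eq_rep]
      simp [PySem.Str.replace, replace_eq]
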